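-- pv_equiv track=rewrite | github.com/BharatSuthar21/WebPage-Similarity | webPageSimilarity.py | simVector
-- ===== SOURCE A (Python) =====
-- def simVector(doc, freq):
--     """
--     return the vector of the simhash
--     """
--     vector = [0]*64
--     for i in doc:
--         for j in range(64):
--             value = doc[i]
--             if value[j] == '1':
--                 vector[j] += 1* freq[i]
--             else:
--                 vector[j] -= 1*freq[i]
--     return vector
-- ===== SOURCE B (Python) =====
-- def simVector(doc, freq):
--     """
--     return the vector of the simhash
--     """
--     total = sum(freq[i] for i in doc)
--     vector = [-total] * 64
--     for i, value in doc.items():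
--         w2 = 2 * freq[i]
--         for j, c in enumerate(value[:64]):
--             if c == '1':
--                 vector[j] += w2
--     return vector
-- ===== Notes on version B (the rewrite author's own statement) =====
-- stated objective: faster
-- what changed: B precomputes the total weight once, starts every bit tally at -total and makes a single additive pass that adds 2*freq[i] at each '1' bit of value[:64], replacing A's per-bit add/subtract branching and its 64 repeated doc[i] dict lookups per document.
import Mathlib
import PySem

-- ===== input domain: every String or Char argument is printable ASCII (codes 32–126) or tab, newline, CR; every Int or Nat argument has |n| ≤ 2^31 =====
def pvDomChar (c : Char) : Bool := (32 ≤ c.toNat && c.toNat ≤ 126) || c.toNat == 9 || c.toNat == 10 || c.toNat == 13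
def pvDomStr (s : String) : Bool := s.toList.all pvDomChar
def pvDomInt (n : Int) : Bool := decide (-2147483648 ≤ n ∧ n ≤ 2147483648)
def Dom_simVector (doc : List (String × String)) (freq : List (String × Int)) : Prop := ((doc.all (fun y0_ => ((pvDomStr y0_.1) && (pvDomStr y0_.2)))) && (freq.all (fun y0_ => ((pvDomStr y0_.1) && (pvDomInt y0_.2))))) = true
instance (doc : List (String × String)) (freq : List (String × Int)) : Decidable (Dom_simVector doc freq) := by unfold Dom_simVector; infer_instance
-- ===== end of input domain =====

-- B precomputes the total weight once, initialises every bit tally to -total, and makes a single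
-- additive pass (+2*freq at each '1' bit), replacing A's per-bit add/subtract branching and its
-- 64 repeated doc[i] lookups per document (a constant-factor mechanism; return value unchanged).

-- ===== PORT A =====
def simVector (doc : List (String × String)) (freq : List (String × Int)) : List Int :=
  let d := PySem.Dict.ofList doc
  let f := PySem.Dict.ofList freq
  d.keys.foldl (fun vector i =>
    (PySem.List.pyRange 0 64).foldl (fun vector j =>
      let value := (d.get? i).getD ""
      if PySem.Str.pyGet? value j = some '1' then
        PySem.List.pySetD vector j (PySem.List.pyGetD vector j 0 + 1 * ((f.get? i).getD 0))
      else
        PySem.List.pySetD vector j (PySem.List.pyGetD vector j 0 - 1 * ((f.get? i).getD 0)))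
      vector)
    (List.replicate 64 0)

-- ===== PORT B =====
def simVector_alt (doc : List (String × String)) (freq : List (String × Int)) : List Int :=
  let d := PySem.Dict.ofList doc
  let f := PySem.Dict.ofList freq
  let total := d.keys.foldl (fun s i => s + ((f.get? i).getD 0)) 0
  d.items.foldl (fun vector iv =>
    let w2 := 2 * ((f.get? iv.1).getD 0)
    (PySem.List.enumerate (PySem.Str.slice iv.2 none (some 64)).toList).foldl
      (fun vector jc =>
        if jc.2 = '1' then
          PySem.List.pySetD vector jc.1 (PySem.List.pyGetD vector jc.1 0 + w2)
        else vector)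
      vector)
    (List.replicate 64 (-total))

-- ===== PRECONDITION & SPEC =====
-- Pre_ excludes exactly the inputs on which the Python A raises: a document whose hash string is
-- shorter than 64 characters (IndexError at value[j]) or whose key is absent from freq (KeyError).
def Pre_simVector (doc : List (String × String)) (freq : List (String × Int)) : Prop :=
  ∀ p ∈ (PySem.Dict.ofList doc).items,
    64 ≤ p.2.toList.length ∧ (PySem.Dict.ofList freq).contains p.1 = true
instance (doc : List (String × String)) (freq : List (String × Int)) : Decidable (Pre_simVector doc freq) := by unfold Pre_simVector; infer_instance

def pvWitness_simVector : (List (String × String)) × (List (String × Int)) :=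
  ([("a", "1010101010101010101010101010101010101010101010101010101010101010")], [("a", 3)])

def Spec_simVector (doc : List (String × String)) (freq : List (String × Int)) (out : List Int) : Prop := out = simVector_alt doc freq
instance (doc : List (String × String)) (freq : List (String × Int)) (out : List Int) : Decidable (Spec_simVector doc freq out) := by unfold Spec_simVector; infer_instance

-- ===== CLAIM (what is proved, stated in full; the proofs are below) =====
def Claim_equal_simVector : Prop := ∀ (doc : List (String × String)) (freq : List (String × Int)), Dom_simVector doc freq → Pre_simVector doc freq → Spec_simVector doc freq (simVector doc freq)

-- ===== LEMMAS AND PROOFS =====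

-- length is preserved by any fold whose step preserves it
theorem pvFoldLen {β : Type} (l : List β) (F : List Int → β → List Int)
    (hf : ∀ w x, (F w x).length = w.length) (v : List Int) :
    (l.foldl F v).length = v.length := by
  induction l generalizing v with
  | nil => rfl
  | cons x xs ih => simpa [List.foldl_cons, hf] using ih (F v x)

-- A's inner loop, pointwise
theorem pvInnerA_get (F : Int) (c : Int → Prop) [DecidablePred c] (n : Nat) (v : List Int)
    (hn : n ≤ v.length) : ∀ k : Nat,
    ((PySem.List.pyRange 0 (n : Int)).foldl (fun w j =>
        if c j then PySem.List.pySetD w j (PySem.List.pyGetD w j 0 + 1 * F)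
        else PySem.List.pySetD w j (PySem.List.pyGetD w j 0 - 1 * F)) v)[k]?
      = if k < n then v[k]?.map (fun z => z + (if c (k : Int) then F else -F)) else v[k]? := by
  induction n with
  | zero =>
    intro k
    rw [show ((0 : Nat) : Int) = 0 by rfl, PySem.List.pyRange_one_eq_nil le_rfl]
    simp
  | succ m ih =>
    intro k
    have hm : m ≤ v.length := Nat.le_of_succ_le hn
    have hmlt : m < v.length := hn
    rw [show ((m + 1 : Nat) : Int) = (m : Int) + 1 by push_cast; ring,
        PySem.List.pyRange_one_succ_right (by positivity), List.foldl_append]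
    set prev := (PySem.List.pyRange 0 (m : Int)).foldl (fun w j =>
        if c j then PySem.List.pySetD w j (PySem.List.pyGetD w j 0 + 1 * F)
        else PySem.List.pySetD w j (PySem.List.pyGetD w j 0 - 1 * F)) v with hprev
    have hplen : prev.length = v.length := by
      rw [hprev]
      apply pvFoldLen
      intro w x
      split
      · rw [PySem.List.length_pySetD]
      · rw [PySem.List.length_pySetD]
    have hprevm : prev[m]? = v[m]? := by
      rw [ih hm m, if_neg (lt_irrefl m)]
    have hprevget : PySem.List.pyGetD prev (m : Int) 0 = v.getD m 0 := by
      rw [PySem.List.pyGetD_natCast, List.getD_eq_getElem?_getD, hprevm,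
          List.getD_eq_getElem?_getD]
    simp only [List.foldl_cons, List.foldl_nil]
    have key : ∀ z : Int,
        (PySem.List.pySetD prev (m : Int) z)[k]? =
          if m = k then some z else prev[k]? := by
      intro z
      rw [PySem.List.pySetD_natCast, List.getElem?_set]
      split
      · rw [if_pos (by omega)]
      · rfl
    have hvm : v[m]? = some v[m] := List.getElem?_eq_getElem hmlt
    by_cases hck : c (m : Int)
    · rw [if_pos hck, key]
      by_cases hmk : m = k
      · subst hmk
        rw [if_pos rfl, if_pos (by omega), hprevget, List.getD_eq_getElem?_getD, hvm]
        simp only [hck, if_pos, Option.getD_some, Option.map_some]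
        norm_num
      · rw [if_neg hmk, ih hm k]
        by_cases hkm : k < m
        · rw [if_pos hkm, if_pos (show k < m + 1 by omega)]
        · rw [if_neg hkm, if_neg (show ¬ k < m + 1 by omega)]
    · rw [if_neg hck, key]
      by_cases hmk : m = k
      · subst hmk
        rw [if_pos rfl, if_pos (by omega), hprevget, List.getD_eq_getElem?_getD, hvm]
        simp only [Option.getD_some, Option.map_some]
        rw [if_neg hck]
        norm_num
        ring
      · rw [if_neg hmk, ih hm k]
        by_cases hkm : k < m
        · rw [if_pos hkm, if_pos (show k < m + 1 by omega)]
        · rw [if_neg hkm, if_neg (show ¬ k < m + 1 by omega)]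

-- B's inner loop, pointwise
theorem pvInnerB_get (w2 : Int) (cs : List Char) : ∀ (s : Nat) (v : List Int),
    s + cs.length ≤ v.length → ∀ k : Nat,
    ((PySem.List.enumerate cs (s : Int)).foldl (fun w jc =>
        if jc.2 = '1' then PySem.List.pySetD w jc.1 (PySem.List.pyGetD w jc.1 0 + w2) else w) v)[k]?
      = if s ≤ k ∧ k < s + cs.length ∧ cs[k - s]? = some '1' then v[k]?.map (fun z => z + w2)
        else v[k]? := by
  induction cs with
  | nil =>
    intro s v h k
    rw [PySem.List.enumerate_nil, List.foldl_nil,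
        if_neg (by rintro ⟨h1, h2, h3⟩; simp at h2; omega)]
  | cons c cs ihcs =>
    intro s v h k
    have hslt : s < v.length := by simp at h; omega
    rw [PySem.List.enumerate_cons, List.foldl_cons,
        show (s : Int) + 1 = ((s + 1 : Nat) : Int) by push_cast; ring]
    have hbitcs : s + 1 ≤ k → (c :: cs)[k - s]? = cs[k - (s + 1)]? := by
      intro hks
      rw [show k - s = (k - (s + 1)) + 1 by omega, List.getElem?_cons_succ]
    by_cases hc : c = '1'
    · simp only [if_pos hc]
      have hlen' : (PySem.List.pySetD v (s : Int) (PySem.List.pyGetD v (s : Int) 0 + w2)).length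
          = v.length := PySem.List.length_pySetD v (s : Int) _
      rw [ihcs (s + 1) _ (by rw [hlen']; simp at h ⊢; omega) k]
      have key : (PySem.List.pySetD v (s : Int) (PySem.List.pyGetD v (s : Int) 0 + w2))[k]?
          = if s = k then some (v.getD s 0 + w2) else v[k]? := by
        rw [PySem.List.pySetD_natCast, PySem.List.pyGetD_natCast]
        by_cases hsk0 : s = k
        · subst hsk0; simp [hslt]
        · simp [hsk0]
      by_cases hsk : s = k
      · subst hsk
        rw [if_neg (by rintro ⟨h1, _, _⟩; omega), key, if_pos rfl,
            if_pos ⟨le_refl s, by simp, by simp [hc]⟩,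
            List.getD_eq_getElem?_getD, List.getElem?_eq_getElem hslt]
        simp
      · rw [key, if_neg hsk]
        by_cases hcond : s + 1 ≤ k ∧ k < s + 1 + cs.length ∧ cs[k - (s + 1)]? = some '1'
        · rw [if_pos hcond,
              if_pos ⟨by omega, by simp; omega, by rw [hbitcs (by omega)]; exact hcond.2.2⟩]
        · rw [if_neg hcond,
              if_neg (by
                rintro ⟨h1, h2, h3⟩
                simp at h2
                exact hcond ⟨by omega, by omega, by rw [← hbitcs (by omega)]; exact h3⟩)]
    · simp only [if_neg hc]
      rw [ihcs (s + 1) v (by simp at h ⊢; omega) k]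
      by_cases hsk : s = k
      · subst hsk
        rw [if_neg (by rintro ⟨h1, _, _⟩; omega),
            if_neg (by
              rintro ⟨_, _, h3⟩
              rw [show s - s = 0 by omega] at h3
              simp at h3
              exact hc h3)]
      · by_cases hcond : s + 1 ≤ k ∧ k < s + 1 + cs.length ∧ cs[k - (s + 1)]? = some '1'
        · rw [if_pos hcond,
              if_pos ⟨by omega, by simp; omega, by rw [hbitcs (by omega)]; exact hcond.2.2⟩]
        · rw [if_neg hcond,
              if_neg (by
                rintro ⟨h1, h2, h3⟩
                simp at h2
                exact hcond ⟨by omega, by omega, by rw [← hbitcs (by omega)]; exact h3⟩)]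

-- outer loop, pointwise: per-step pointwise deltas accumulate into a sum
theorem pvOuter_get {β : Type} (l : List β) (F : List Int → β → List Int) (δ : β → Nat → Int)
    (hf : ∀ w x, (F w x).length = w.length)
    (hget : ∀ w x, w.length = 64 → ∀ k : Nat,
        (F w x)[k]? = if k < 64 then w[k]?.map (fun z => z + δ x k) else w[k]?)
    (v : List Int) (hv : v.length = 64) (k : Nat) :
    (l.foldl F v)[k]?
      = if k < 64 then v[k]?.map (fun z => z + l.foldl (fun s x => s + δ x k) 0) else v[k]? := by
  induction l generalizing v with
  | nil =>
    simp only [List.foldl_nil]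
    split
    · cases v[k]? <;> simp
    · rfl
  | cons x xs ih =>
    simp only [List.foldl_cons]
    rw [ih (F v x) (by rw [hf]; exact hv)]
    rw [PySem.List.foldl_add, PySem.List.foldl_add]
    split
    · case isTrue hk =>
      rw [hget v x hv k, if_pos hk]
      cases v[k]?
      · simp
      · simp
        ring
    · case isFalse hk =>
      exact hget v x hv k ▸ if_neg hk

-- sums of pointwise-added deltas
theorem pvFoldAddPair {β : Type} (l : List β) (p q r : β → Int)
    (h : ∀ x ∈ l, p x + q x = r x) :
    l.foldl (fun s x => s + p x) 0 + l.foldl (fun s x => s + q x) 0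
      = l.foldl (fun s x => s + r x) 0 := by
  rw [PySem.List.foldl_add, PySem.List.foldl_add, PySem.List.foldl_add]
  have : ∀ (m : List β), (∀ x ∈ m, p x + q x = r x) →
      (m.map p).sum + (m.map q).sum = (m.map r).sum := by
    intro m hm
    induction m with
    | nil => simp
    | cons y ys ih =>
      simp only [List.map_cons, List.sum_cons]
      have := ih (fun x hx => hm x (List.mem_cons_of_mem _ hx))
      have hy := hm y (List.mem_cons_self)
      omega
  have h2 := this l h
  omega

-- a dict maps each of its items' keys to that item's value
theorem pvGetOfMemItems {ν : Type} (l : List (String × ν)) (h : (l.map Prod.fst).Nodup)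
    (p : String × ν) (hp : p ∈ l) : (PySem.Dict.mk l).get? p.1 = some p.2 := by
  induction l with
  | nil => cases hp
  | cons q rest ih =>
    rw [show (q :: rest) = ((q.1, q.2) :: rest) by rfl, PySem.Dict.get?_mk_cons]
    have h' := h
    rw [List.map_cons] at h'
    obtain ⟨hnotin, hnd⟩ := List.nodup_cons.mp h'
    rcases List.mem_cons.mp hp with hpe | hpm
    · subst hpe; simp
    · have hne : (q.1 == p.1) = false := by
        apply beq_eq_false_iff_ne.mpr
        intro hcontra
        exact hnotin (by rw [hcontra]; exact List.mem_map_of_mem hpm)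
      rw [hne]
      exact ih hnd hpm

-- main equivalence, stated let-free over an arbitrary dict with distinct keys
theorem pvMain (d : PySem.Dict String String) (f : PySem.Dict String Int)
    (hnd : (d.items.map Prod.fst).Nodup)
    (hpre : ∀ p ∈ d.items, 64 ≤ p.2.toList.length) :
    d.keys.foldl (fun vector i =>
      (PySem.List.pyRange 0 64).foldl (fun vector j =>
        if PySem.Str.pyGet? ((d.get? i).getD "") j = some '1' then
          PySem.List.pySetD vector j (PySem.List.pyGetD vector j 0 + 1 * ((f.get? i).getD 0))
        else
          PySem.List.pySetD vector j (PySem.List.pyGetD vector j 0 - 1 * ((f.get? i).getD 0)))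
        vector)
      (List.replicate 64 0)
    = d.items.foldl (fun vector iv =>
        (PySem.List.enumerate (PySem.Str.slice iv.2 none (some 64)).toList).foldl
          (fun vector jc =>
            if jc.2 = '1' then
              PySem.List.pySetD vector jc.1 (PySem.List.pyGetD vector jc.1 0 + 2 * ((f.get? iv.1).getD 0))
            else vector)
          vector)
        (List.replicate 64
          (-(d.keys.foldl (fun s i => s + ((f.get? i).getD 0)) 0))) := by
  have hkeys : d.keys = d.items.map Prod.fst := rfl
  rw [hkeys]
  simp only [List.foldl_map]
  have hcsle : ∀ t : String, (PySem.Str.slice t none (some 64)).toList.length ≤ 64 := by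
    intro t
    rw [PySem.Str.toList_slice,
        show PySem.Chars.slice t.toList none (some 64) = PySem.List.slice t.toList none (some 64)
          from rfl,
        PySem.List.slice_to _ (show (0:Int) ≤ 64 by norm_num)]
    simp
  have hfA : ∀ (w : List Int) (iv : String × String),
      ((PySem.List.pyRange 0 64).foldl (fun vector j =>
        if PySem.Str.pyGet? ((d.get? iv.1).getD "") j = some '1' then
          PySem.List.pySetD vector j (PySem.List.pyGetD vector j 0 + 1 * ((f.get? iv.1).getD 0))
        else
          PySem.List.pySetD vector j (PySem.List.pyGetD vector j 0 - 1 * ((f.get? iv.1).getD 0)))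
        w).length = w.length := by
    intro w iv
    apply pvFoldLen
    intro w' j
    split
    · rw [PySem.List.length_pySetD]
    · rw [PySem.List.length_pySetD]
  have hgA : ∀ (w : List Int) (iv : String × String), w.length = 64 → ∀ k : Nat,
      ((PySem.List.pyRange 0 64).foldl (fun vector j =>
        if PySem.Str.pyGet? ((d.get? iv.1).getD "") j = some '1' then
          PySem.List.pySetD vector j (PySem.List.pyGetD vector j 0 + 1 * ((f.get? iv.1).getD 0))
        else
          PySem.List.pySetD vector j (PySem.List.pyGetD vector j 0 - 1 * ((f.get? iv.1).getD 0)))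
        w)[k]?
      = if k < 64 then w[k]?.map (fun z => z +
          (if PySem.Str.pyGet? ((d.get? iv.1).getD "") (k : Int) = some '1' then
            ((f.get? iv.1).getD 0) else -((f.get? iv.1).getD 0))) else w[k]? := by
    intro w iv hw k
    exact pvInnerA_get ((f.get? iv.1).getD 0)
      (fun j => PySem.Str.pyGet? ((d.get? iv.1).getD "") j = some '1') 64 w (by omega) k
  have hfB : ∀ (w : List Int) (iv : String × String),
      ((PySem.List.enumerate (PySem.Str.slice iv.2 none (some 64)).toList).foldl
        (fun vector jc =>
          if jc.2 = '1' then
            PySem.List.pySetD vector jc.1 (PySem.List.pyGetD vector jc.1 0 + 2 * ((f.get? iv.1).getD 0))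
          else vector) w).length = w.length := by
    intro w iv
    apply pvFoldLen
    intro w' jc
    split
    · rw [PySem.List.length_pySetD]
    · rfl
  have hgB : ∀ (w : List Int) (iv : String × String), w.length = 64 → ∀ k : Nat,
      ((PySem.List.enumerate (PySem.Str.slice iv.2 none (some 64)).toList).foldl
        (fun vector jc =>
          if jc.2 = '1' then
            PySem.List.pySetD vector jc.1 (PySem.List.pyGetD vector jc.1 0 + 2 * ((f.get? iv.1).getD 0))
          else vector) w)[k]?
      = if k < 64 then w[k]?.map (fun z => z +
          (if k < (PySem.Str.slice iv.2 none (some 64)).toList.length ∧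
              (PySem.Str.slice iv.2 none (some 64)).toList[k]? = some '1' then
            2 * ((f.get? iv.1).getD 0) else 0)) else w[k]? := by
    intro w iv hw k
    have h0 := pvInnerB_get (2 * ((f.get? iv.1).getD 0))
      (PySem.Str.slice iv.2 none (some 64)).toList 0 w
      (by rw [hw]; simpa using hcsle iv.2) k
    apply Eq.trans h0
    by_cases hk : k < 64
    · rw [if_pos hk]
      by_cases hcnd : k < (PySem.Str.slice iv.2 none (some 64)).toList.length ∧
          (PySem.Str.slice iv.2 none (some 64)).toList[k]? = some '1'
      · rw [if_pos ⟨Nat.zero_le k, by omega, by simpa using hcnd.2⟩, if_pos hcnd]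
      · rw [if_neg (by
            rintro ⟨h1, h2, h3⟩
            exact hcnd ⟨by omega, by simpa using h3⟩), if_neg hcnd]
        cases w[k]? <;> simp
    · rw [if_neg hk,
          if_neg (by rintro ⟨h1, h2, h3⟩; have := hcsle iv.2; omega)]
  apply List.ext_getElem?
  intro k
  have hA := pvOuter_get d.items _
    (fun iv k => if PySem.Str.pyGet? ((d.get? iv.1).getD "") (k : Int) = some '1' then
        ((f.get? iv.1).getD 0) else -((f.get? iv.1).getD 0))
    hfA hgA (List.replicate 64 (0 : Int)) (by simp) k
  have hB := pvOuter_get d.items _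
    (fun iv k => if k < (PySem.Str.slice iv.2 none (some 64)).toList.length ∧
          (PySem.Str.slice iv.2 none (some 64)).toList[k]? = some '1' then
        2 * ((f.get? iv.1).getD 0) else 0)
    hfB hgB
    (List.replicate 64
      (-(d.items.foldl (fun s iv => s + ((f.get? iv.1).getD 0)) 0))) (by simp) k
  refine hA.trans (Eq.trans ?_ hB.symm)
  by_cases hk : k < 64
  · rw [if_pos hk, if_pos hk]
    simp only [List.getElem?_replicate, if_pos hk, Option.map_some]
    have hpair := pvFoldAddPair d.items
      (fun iv => if PySem.Str.pyGet? ((d.get? iv.1).getD "") (k : Int) = some '1' then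
          ((f.get? iv.1).getD 0) else -((f.get? iv.1).getD 0))
      (fun iv => (f.get? iv.1).getD 0)
      (fun iv => if k < (PySem.Str.slice iv.2 none (some 64)).toList.length ∧
            (PySem.Str.slice iv.2 none (some 64)).toList[k]? = some '1' then
          2 * ((f.get? iv.1).getD 0) else 0)
      (by
        intro iv hiv
        beta_reduce
        have hg : d.get? iv.1 = some iv.2 := pvGetOfMemItems d.items hnd iv hiv
        have hlen := hpre iv hiv
        have hcs : (PySem.Str.slice iv.2 none (some 64)).toList = iv.2.toList.take 64 := by
          rw [PySem.Str.toList_slice,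
              show PySem.Chars.slice iv.2.toList none (some 64)
                = PySem.List.slice iv.2.toList none (some 64) from rfl,
              PySem.List.slice_to _ (show (0:Int) ≤ 64 by norm_num)]
          rfl
        have hcslen : (PySem.Str.slice iv.2 none (some 64)).toList.length = 64 := by
          rw [hcs, List.length_take]
          omega
        have hidx : (PySem.Str.slice iv.2 none (some 64)).toList[k]? = iv.2.toList[k]? := by
          rw [hcs, List.getElem?_take, if_pos hk]
        rw [hg]
        simp only [Option.getD_some, PySem.Str.pyGet?_natCast, hidx, hcslen]
        by_cases hbit : iv.2.toList[k]? = some '1'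
        · rw [if_pos hbit, if_pos ⟨hk, hbit⟩]
          ring
        · rw [if_neg hbit, if_neg (by rintro ⟨_, hb⟩; exact hbit hb)]
          ring)
    beta_reduce at hpair ⊢
    congr 1
    omega
  · rw [if_neg hk, if_neg hk, List.getElem?_replicate, List.getElem?_replicate,
        if_neg hk, if_neg hk]

-- ===== VERDICT (by name: the statement is the Claim_ definition above) =====
theorem simVector_spec : Claim_equal_simVector := by
  intro doc freq _hdom hpre
  unfold Spec_simVector
  exact pvMain (PySem.Dict.ofList doc) (PySem.Dict.ofList freq)
    (PySem.Dict.nodup_keys_ofList doc)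
    (fun p hp => (hpre p hp).1)
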